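-- pv_equiv track=rewrite | github.com/wlghsp/ProblemSolving_Everyday | 기타/niver_2024/행복한식물-1.py | solve
-- ===== SOURCE A (Python) =====
-- def solve(emotions, orders):
--     N = len(emotions)
--
--     initial_emotions = emotions[:]
--     current_state = emotions.copy()
--     is_dead = [False] * N
--     result = []
--
--     for i in range(len(orders)):
--         water_give_idx = orders[i] - 1
--         for j in range(N):
--             if is_dead[j]: continue
--
--             if water_give_idx == j:
--                 current_state[j] = initial_emotions[j]
--
--             current_state[j] -= 1
--             if current_state[j] == 0:
--                 is_dead[j] = True
--
--         cnt = 0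
--         for state in current_state:
--             if state > 0:
--                cnt += 1
--
--         result.append(cnt)
--
--
--     return result
-- ===== SOURCE B (Python) =====
-- def solve(emotions, orders):
--     M = len(orders)
--     # occurrence steps of each watered plant index, in order
--     occ = {}
--     for s, o in enumerate(orders):
--         occ.setdefault(o - 1, []).append(s)
--     # per positive plant: death step (state hits 0 during that step); difference array
--     deaths_at = [0] * (M + 1)
--     positive = 0
--     for j, e in enumerate(emotions):
--         if e <= 0:
--             continue
--         positive += 1
--         d = e - 1
--         for s in occ.get(j, ()):
--             if s <= d:
--                 d = s + e - 1
--             else: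
--                 break
--         if d < M:
--             deaths_at[d] += 1
--     res = []
--     alive = positive
--     for t in range(M):
--         alive -= deaths_at[t]
--         res.append(alive)
--     return res
-- ===== Notes on version B (the rewrite author's own statement) =====
-- stated objective: faster
-- what changed: Instead of re-simulating every plant at every order (O(N*M)), B groups watering steps per plant once, computes each positive plant's single death step by walking only its own watering steps, and produces the per-step survivor counts with a difference array over death steps.
import Mathlib
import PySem

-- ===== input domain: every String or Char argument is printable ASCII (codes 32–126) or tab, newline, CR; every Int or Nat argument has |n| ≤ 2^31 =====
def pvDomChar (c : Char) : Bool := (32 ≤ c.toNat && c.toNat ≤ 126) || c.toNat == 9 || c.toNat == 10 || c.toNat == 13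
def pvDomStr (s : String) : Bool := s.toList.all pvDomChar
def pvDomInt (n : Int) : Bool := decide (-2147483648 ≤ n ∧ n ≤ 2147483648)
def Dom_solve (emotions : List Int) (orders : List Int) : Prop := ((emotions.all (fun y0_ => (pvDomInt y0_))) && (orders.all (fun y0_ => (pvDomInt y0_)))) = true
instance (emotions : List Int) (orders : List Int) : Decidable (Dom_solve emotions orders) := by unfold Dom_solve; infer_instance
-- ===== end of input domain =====

-- B replaces A's per-order re-scan of all plants by a single grouping of watering
-- steps per plant, one death-step computation per plant, and a difference array
-- over death steps (objective: faster; measured and asymptotic O(N+M) vs O(N*M)).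

-- ===== PORT A =====
-- body of A's inner loop for one plant j: (current, is_dead) -> (current, is_dead)
def aBody (w j i : Int) (cd : Int × Bool) : Int × Bool :=
  if cd.2 then cd
  else
    let c1 := if w == j then i else cd.1
    let c2 := c1 - 1
    (c2, c2 == 0)

-- A's inner 'for j in range(N)' over the three lists (initial, current, is_dead)
def aInner (w : Int) : Int → List Int → List Int → List Bool → List Int × List Bool
  | _, [], _, _ => ([], [])
  | _, _ :: _, [], _ => ([], [])
  | _, _ :: _, _ :: _, [] => ([], [])
  | j, i :: is, c :: cs, d :: ds =>
      let cd := aBody w j i (c, d)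
      let r := aInner w (j + 1) is cs ds
      (cd.1 :: r.1, cd.2 :: r.2)

-- A's counting loop 'for state in current_state: if state > 0: cnt += 1'
def pyCountPos (cur : List Int) : Int :=
  cur.foldl (fun c s => if s > 0 then c + 1 else c) 0

-- one iteration of A's outer loop over orders
def aGo (emotions : List Int) (st : List Int × List Bool × List Int) (o : Int) :
    List Int × List Bool × List Int :=
  let w := o - 1
  let cd := aInner w 0 emotions st.1 st.2.1
  let cnt := pyCountPos cd.1
  (cd.1, cd.2, st.2.2 ++ [cnt])

def solve (emotions : List Int) (orders : List Int) : List Int :=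
  (orders.foldl (aGo emotions)
      (emotions, List.replicate emotions.length false, ([] : List Int))).2.2

-- ===== PORT B =====
-- occ[o-1].append(s) over enumerate(orders)  (setdefault(k, []).append(s) = modify k [] (· ++ [s]))
def occBuild (orders : List Int) : PySem.Dict Int (List Int) :=
  (PySem.List.enumerate orders).foldl
    (fun d p => d.modify (p.2 - 1) [] (fun l => l ++ [p.1])) PySem.Dict.empty

-- B's per-plant loop 'for s in occ.get(j, ()): if s <= d: d = s + e - 1 else: break'
def bDeath (e : Int) : Int → List Int → Int
  | d, [] => d
  | d, s :: rest => if s ≤ d then bDeath e (s + e - 1) rest else d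

-- one iteration of B's loop over enumerate(emotions); acc = (positive, deaths_at)
-- deaths_at[d] += 1 ported with pyGetD/pySetD (exact: 0 ≤ d < len(deaths_at) always holds here)
def bPlantStep (M : Int) (occ : PySem.Dict Int (List Int)) (acc : Int × List Int)
    (p : Int × Int) : Int × List Int :=
  if p.2 ≤ 0 then acc
  else
    let d := bDeath p.2 (p.2 - 1) (occ.getD p.1 [])
    (acc.1 + 1,
     if d < M then PySem.List.pySetD acc.2 d (PySem.List.pyGetD acc.2 d 0 + 1)
     else acc.2)

-- one iteration of B's final 'for t in range(M)' loop
def bCountStep (deaths : List Int) (st : Int × List Int) (t : Int) : Int × List Int :=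
  let alive := st.1 - PySem.List.pyGetD deaths t 0
  (alive, st.2 ++ [alive])

def solve_alt (emotions : List Int) (orders : List Int) : List Int :=
  let M : Int := orders.length
  let occ := occBuild orders
  let pd :=
    (PySem.List.enumerate emotions).foldl (bPlantStep M occ)
      ((0 : Int), List.replicate (orders.length + 1) (0 : Int))
  ((PySem.List.pyRange 0 M 1).foldl (bCountStep pd.2) (pd.1, ([] : List Int))).2

-- ===== PRECONDITION & SPEC =====
def Spec_solve (emotions : List Int) (orders : List Int) (out : List Int) : Prop := out = solve_alt emotions orders
instance (emotions : List Int) (orders : List Int) (out : List Int) : Decidable (Spec_solve emotions orders out) := by unfold Spec_solve; infer_instance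

-- ===== CLAIM (what is proved, stated in full; the proofs are below) =====
def Claim_equal_solve : Prop := ∀ (emotions : List Int) (orders : List Int), Dom_solve emotions orders → Spec_solve emotions orders (solve emotions orders)

-- ===== LEMMAS AND PROOFS =====

-- step indices (0-based, as Int) at which plant j is watered
def occsOf (orders : List Int) (j : Int) : List Int :=
  ((PySem.List.enumerate orders).filter (fun p => p.2 - 1 == j)).map (·.1)

-- death step of a positive plant (value ≥ orders length = never dies in time)
def deathOf (orders : List Int) (j e : Int) : Int := bDeath e (e - 1) (occsOf orders j)

theorem deathOf_def (os : List Int) (j e : Int) :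
    bDeath e (e - 1) (occsOf os j) = deathOf os j e := rfl

-- the common closed form: survivors after step t
def specCnt (emotions orders : List Int) (t : Int) : Int :=
  ((PySem.List.enumerate emotions).countP
    (fun p => decide (0 < p.2) && decide (t < deathOf orders p.1 p.2)) : Int)

-- per-plant run of A's loop body over a prefix of orders
def runS (p : List Int) (j e : Int) : Int × Bool :=
  p.foldl (fun cd o => aBody (o - 1) j e cd) (e, false)

def pLast (l : List Int) : Int := l.getLastD 0

-- ---- generic facts about bDeath ----
theorem bDeath_snoc (e d0 s : Int) (l : List Int) (h : ∀ x ∈ l, x < s) :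
    bDeath e d0 (l ++ [s]) =
      (if s ≤ bDeath e d0 l then s + e - 1 else bDeath e d0 l) := by
  induction l generalizing d0 with
  | nil => simp [bDeath]
  | cons x xs ih =>
      simp only [List.cons_append, bDeath]
      by_cases hx : x ≤ d0
      · simp only [if_pos hx]
        exact ih _ (fun y hy => h y (List.mem_cons_of_mem _ hy))
      · have hxs : x < s := h x (List.mem_cons_self)
        simp only [if_neg hx]
        have : ¬ s ≤ d0 := by omega
        simp [this]

theorem bDeath_ge (e T : Int) (he : 1 ≤ e) (l : List Int) :
    ∀ d0, (∀ x ∈ l, T ≤ x) → T ≤ d0 → T ≤ bDeath e d0 l := by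
  intro d0 hl hd
  induction l generalizing d0 with
  | nil => simpa [bDeath] using hd
  | cons x xs ih =>
      simp only [bDeath]
      by_cases hx : x ≤ d0
      · simp only [if_pos hx]
        exact ih _ (fun y hy => hl y (List.mem_cons_of_mem _ hy))
          (by have := hl x List.mem_cons_self; omega)
      · simpa [hx] using hd

theorem bDeath_high (e T : Int) (he : 1 ≤ e) (l : List Int) :
    ∀ d0, (∀ x ∈ l, T ≤ x) → (T ≤ bDeath e d0 l ↔ T ≤ d0) := by
  intro d0 hl
  constructor
  · intro h
    by_contra hd
    cases l with
    | nil => simp [bDeath] at h; omega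
    | cons x xs =>
        have hx : ¬ x ≤ d0 := by have := hl x List.mem_cons_self; omega
        simp only [bDeath, if_neg hx] at h
        omega
  · intro hd
    exact bDeath_ge e T he l d0 hl hd

theorem bDeath_split (e T : Int) (he : 1 ≤ e) (l1 l2 : List Int)
    (h2 : ∀ x ∈ l2, T ≤ x) :
    ∀ d0, (T ≤ bDeath e d0 (l1 ++ l2) ↔ T ≤ bDeath e d0 l1) := by
  intro d0
  induction l1 generalizing d0 with
  | nil => simpa using bDeath_high e T he l2 d0 h2
  | cons x xs ih =>
      simp only [List.cons_append, bDeath]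
      by_cases hx : x ≤ d0
      · simp only [if_pos hx]; exact ih _
      · simp [hx]

theorem bDeath_nonneg (e : Int) (he : 1 ≤ e) (l : List Int) :
    ∀ d0, (∀ x ∈ l, 0 ≤ x) → 0 ≤ d0 → 0 ≤ bDeath e d0 l := by
  intro d0 hl hd
  induction l generalizing d0 with
  | nil => simpa [bDeath] using hd
  | cons x xs ih =>
      simp only [bDeath]
      by_cases hx : x ≤ d0
      · simp only [if_pos hx]
        exact ih _ (fun y hy => hl y (List.mem_cons_of_mem _ hy))
          (by have := hl x List.mem_cons_self; omega)
      · simpa [hx] using hd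

-- ---- facts about occsOf / pLast ----
theorem occs_append (p : List Int) (o j : Int) :
    occsOf (p ++ [o]) j
      = occsOf p j ++ (if (o - 1) == j then [((p.length : Int))] else []) := by
  simp only [occsOf, PySem.List.enumerate_append, List.filter_append, List.map_append]
  congr 1
  by_cases h : (o - 1) = j
  · simp [PySem.List.enumerate_cons, PySem.List.enumerate_nil, h]
  · simp [PySem.List.enumerate_cons, PySem.List.enumerate_nil, h]

theorem occs_mem (p : List Int) (j : Int) :
    ∀ s ∈ occsOf p j, 0 ≤ s ∧ s < (p.length : Int) := by
  intro s hs
  simp only [occsOf, List.mem_map, List.mem_filter] at hs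
  obtain ⟨q, ⟨hq, _⟩, rfl⟩ := hs
  rw [PySem.List.mem_enumerate_iff] at hq
  obtain ⟨k, hk, rfl⟩ := hq
  constructor <;> simp <;> omega

theorem occs_take (os : List Int) (j : Int) (k : Nat) (hk : k ≤ os.length) :
    ∃ l2, occsOf os j = occsOf (os.take k) j ++ l2 ∧ ∀ x ∈ l2, (k : Int) ≤ x := by
  refine ⟨((PySem.List.enumerate (os.drop k) (k : Int)).filter
      (fun p => p.2 - 1 == j)).map (·.1), ?_, ?_⟩
  · conv_lhs => rw [occsOf, ← List.take_append_drop k os]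
    rw [PySem.List.enumerate_append, List.filter_append, List.map_append]
    congr 2
    simp [List.length_take, Nat.min_eq_left hk]
  · intro x hx
    simp only [List.mem_map, List.mem_filter] at hx
    obtain ⟨q, ⟨hq, _⟩, rfl⟩ := hx
    rw [PySem.List.mem_enumerate_iff] at hq
    obtain ⟨i, hi, rfl⟩ := hq
    simp

theorem pLast_snoc (l : List Int) (s : Int) : pLast (l ++ [s]) = s := by
  simp [pLast]

theorem pLast_occs_bound (p : List Int) (j : Int) :
    0 ≤ pLast (occsOf p j) ∧ pLast (occsOf p j) ≤ (p.length : Int) := by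
  cases h : occsOf p j with
  | nil =>
      constructor
      · simp [pLast]
      · simp [pLast]
  | cons x xs =>
      have hm : pLast (x :: xs) ∈ occsOf p j := by
        rw [h, pLast, List.getLastD_cons]
        exact List.getLastD_mem_cons
      have hb := occs_mem p j _ hm
      exact ⟨hb.1, le_of_lt hb.2⟩

-- ---- A side ----
theorem inner_map (w : Int) (es : List Int) :
    ∀ (j0 : Int) (S : Int → Int → Int × Bool),
    aInner w j0 es ((PySem.List.enumerate es j0).map (fun q => (S q.1 q.2).1))
      ((PySem.List.enumerate es j0).map (fun q => (S q.1 q.2).2))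
    = ((PySem.List.enumerate es j0).map (fun q => (aBody w q.1 q.2 (S q.1 q.2)).1),
       (PySem.List.enumerate es j0).map (fun q => (aBody w q.1 q.2 (S q.1 q.2)).2)) := by
  induction es with
  | nil => intro j0 S; simp [aInner, PySem.List.enumerate_nil]
  | cons x xs ih =>
      intro j0 S
      simp only [PySem.List.enumerate_cons, List.map_cons, aInner, ih (j0 + 1) S]

theorem runS_snoc (p : List Int) (o j e : Int) :
    runS (p ++ [o]) j e = aBody (o - 1) j e (runS p j e) := by
  simp [runS, List.foldl_append]

theorem runS_char (j e : Int) (p : List Int) :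
    runS p j e =
      (if 0 < e then
         (if deathOf p j e < (p.length : Int) then ((0 : Int), true)
          else (deathOf p j e + 1 - p.length, false))
       else (e + pLast (occsOf p j) - p.length, false)) := by
  induction p using List.reverseRecOn with
  | nil =>
      simp only [runS, List.foldl_nil, List.length_nil, Nat.cast_zero]
      by_cases he : 0 < e
      · rw [if_pos he, if_neg (by rw [show deathOf [] j e = e - 1 from rfl]; omega),
          show deathOf [] j e = e - 1 from rfl, Prod.mk.injEq]
        exact ⟨by ring, rfl⟩
      · rw [if_neg he, show pLast (occsOf ([] : List Int) j) = 0 from rfl, Prod.mk.injEq]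
        exact ⟨by ring, rfl⟩
  | append_singleton p o ih =>
      have hocc := occs_append p o j
      have hmem := occs_mem p j
      have hbound := pLast_occs_bound p j
      have hlen : (((p ++ [o]).length : Nat) : Int) = (p.length : Int) + 1 := by
        simp
      rw [runS_snoc, ih, hlen]
      by_cases he : 0 < e
      · have he1 : 1 ≤ e := he
        by_cases hdp : deathOf p j e < (p.length : Int)
        · -- already dead after p: state is (0, true) and stays
          have hd' : deathOf (p ++ [o]) j e = deathOf p j e := by
            rw [← deathOf_def, hocc]
            by_cases hw : (o - 1) = j
            · rw [if_pos (by simp [hw]),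
                bDeath_snoc _ _ _ _ (fun x hx => (hmem x hx).2), deathOf_def,
                if_neg (by omega)]
            · rw [if_neg (by simp [hw]), List.append_nil, deathOf_def]
          rw [if_pos he, if_pos hdp, hd', if_pos he, if_pos (by omega)]
          simp [aBody]
        · push_neg at hdp
          rw [if_pos he, if_neg (by omega)]
          by_cases hw : (o - 1) = j
          · have hd' : deathOf (p ++ [o]) j e = (p.length : Int) + e - 1 := by
              rw [← deathOf_def, hocc, if_pos (by simp [hw]),
                bDeath_snoc _ _ _ _ (fun x hx => (hmem x hx).2), deathOf_def,
                if_pos (by omega)]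
            have hbeq : ((o - 1 : Int) == j) = true := by simp [hw]
            simp only [aBody, hbeq, hd', if_pos he]
            rw [if_neg (by simp), if_true]
            by_cases he2 : e = 1
            · rw [if_pos (by omega), Prod.mk.injEq]
              subst he2
              exact ⟨by ring, by simp⟩
            · rw [if_neg (by omega), Prod.mk.injEq]
              refine ⟨by ring, ?_⟩
              simp
              omega
          · have hd' : deathOf (p ++ [o]) j e = deathOf p j e := by
              rw [← deathOf_def, hocc, if_neg (by simp [hw]), List.append_nil, deathOf_def]
            have hbeq : ((o - 1 : Int) == j) = false := by simp [hw]
            simp only [aBody, hbeq, hd', if_pos he]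
            rw [if_neg (by simp), if_neg (by simp)]
            by_cases hdt : deathOf p j e = (p.length : Int)
            · rw [if_pos (by omega), Prod.mk.injEq]
              refine ⟨by omega, ?_⟩
              simp
              omega
            · rw [if_neg (by omega), Prod.mk.injEq]
              refine ⟨by ring, ?_⟩
              simp
              omega
      · -- non-positive plant: alive forever, state only decreases
        rw [if_neg he]
        by_cases hw : (o - 1) = j
        · have hbeq : ((o - 1 : Int) == j) = true := by simp [hw]
          have hpl : pLast (occsOf (p ++ [o]) j) = (p.length : Int) := by
            rw [hocc, if_pos (by simp [hw]), pLast_snoc]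
          simp only [aBody, hbeq]
          rw [if_neg (by simp), if_true, if_neg he, hpl, Prod.mk.injEq]
          refine ⟨by ring, ?_⟩
          simp
          omega
        · have hbeq : ((o - 1 : Int) == j) = false := by simp [hw]
          have hpl : pLast (occsOf (p ++ [o]) j) = pLast (occsOf p j) := by
            rw [hocc, if_neg (by simp [hw]), List.append_nil]
          simp only [aBody, hbeq]
          rw [if_neg (by simp), if_neg (by simp), if_neg he, hpl, Prod.mk.injEq]
          refine ⟨by ring, ?_⟩
          simp
          omega

theorem outer_inv (em : List Int) (p : List Int) :
    p.foldl (aGo em) (em, List.replicate em.length false, ([] : List Int))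
      = ((PySem.List.enumerate em 0).map (fun q => (runS p q.1 q.2).1),
         (PySem.List.enumerate em 0).map (fun q => (runS p q.1 q.2).2),
         (List.range p.length).map (fun t =>
           pyCountPos ((PySem.List.enumerate em 0).map
             (fun q => (runS (p.take (t + 1)) q.1 q.2).1)))) := by
  induction p using List.reverseRecOn with
  | nil =>
      have h1 : (PySem.List.enumerate em 0).map (fun q => (runS [] q.1 q.2).1) = em := by
        simp [runS, PySem.List.map_snd_enumerate]
      have h2 : (PySem.List.enumerate em 0).map (fun q => (runS [] q.1 q.2).2)
          = List.replicate em.length false := by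
        simp only [runS, List.foldl_nil]
        rw [List.map_const']
        simp [PySem.List.length_enumerate]
      simp only [List.foldl_nil, List.length_nil, List.range_zero, List.map_nil, h1, h2]
  | append_singleton p o ih =>
      rw [List.foldl_append, ih, List.foldl_cons, List.foldl_nil]
      simp only [aGo]
      rw [inner_map (o - 1) em 0 (fun j e => runS p j e)]
      have hstep : ∀ (a b : Int), aBody (o - 1) a b (runS p a b) = runS (p ++ [o]) a b :=
        fun a b => (runS_snoc p o a b).symm
      simp only [hstep]
      rw [Prod.mk.injEq, Prod.mk.injEq]
      refine ⟨rfl, rfl, ?_⟩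
      simp only [List.length_append, List.length_cons, List.length_nil, Nat.zero_add]
      rw [List.range_succ, List.map_append]
      congr 1
      · apply List.map_congr_left
        intro t ht
        rw [List.mem_range] at ht
        rw [List.take_append_of_le_length (by omega)]
      · simp only [List.map_cons, List.map_nil]
        rw [List.take_of_length_le (by simp)]

theorem pyCountPos_eq (l : List Int) :
    pyCountPos l = (l.countP (fun s => decide (0 < s)) : Int) := by
  have aux : ∀ (l : List Int) (c : Int),
      l.foldl (fun c s => if s > 0 then c + 1 else c) c
        = c + (l.countP (fun s => decide (0 < s)) : Int) := by
    intro l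
    induction l with
    | nil => intro c; simp
    | cons x xs ih =>
        intro c
        simp only [List.foldl_cons, List.countP_cons, ih]
        by_cases hx : 0 < x
        · simp [hx]
          push_cast
          ring
        · simp [hx]
  simpa [pyCountPos] using aux l 0

theorem cnt_eq (em os : List Int) (t : Nat) (ht : t < os.length) :
    pyCountPos ((PySem.List.enumerate em 0).map
        (fun q => (runS (os.take (t + 1)) q.1 q.2).1))
      = specCnt em os t := by
  rw [pyCountPos_eq, List.countP_map, specCnt]
  congr 1
  apply List.countP_congr
  intro q _
  have hlen : (((os.take (t + 1)).length : Nat) : Int) = (t : Int) + 1 := by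
    simp [List.length_take]
    omega
  simp only [Function.comp_apply]
  rw [runS_char, hlen]
  have hbound := pLast_occs_bound (os.take (t + 1)) q.1
  rw [hlen] at hbound
  obtain ⟨l2, hsplit, hge⟩ := occs_take os q.1 (t + 1) (by omega)
  have hge' : ∀ x ∈ l2, (t : Int) + 1 ≤ x := by
    intro x hx
    have := hge x hx
    push_cast at this
    omega
  by_cases he : 0 < q.2
  · have hiff := bDeath_split q.2 ((t : Int) + 1) he
      (occsOf (os.take (t + 1)) q.1) l2 hge' (q.2 - 1)
    rw [← hsplit] at hiff
    rw [deathOf_def, deathOf_def] at hiff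
    rw [if_pos he]
    by_cases hdp : deathOf (os.take (t + 1)) q.1 q.2 < (t : Int) + 1
    · rw [if_pos hdp]
      have h1 : ¬ ((t : Int) < deathOf os q.1 q.2) := by
        intro hcon
        have := hiff.mp (by omega)
        omega
      simp [h1]
    · rw [if_neg hdp]
      push_neg at hdp
      have h1 : (t : Int) < deathOf os q.1 q.2 := by
        have := hiff.mpr (by omega)
        omega
      have h2 : (0 : Int) < deathOf (os.take (t + 1)) q.1 q.2 + 1 - ((t : Int) + 1) := by
        omega
      simp [he, h1, h2]
      omega
  · rw [if_neg he]
    have h2 : ¬ ((0 : Int) < q.2 + pLast (occsOf (os.take (t + 1)) q.1) - ((t : Int) + 1)) := by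
      omega
    simp [he, h2]
    omega

theorem solve_eq_spec (em os : List Int) :
    solve em os = (List.range os.length).map (fun t : Nat => specCnt em os (t : Int)) := by
  rw [solve, outer_inv]
  dsimp only
  apply List.map_congr_left
  intro t ht
  rw [List.mem_range] at ht
  exact cnt_eq em os t ht

-- ---- B side ----
theorem occ_loop_getD (j : Int) (l : List (Int × Int)) :
    ∀ (d : PySem.Dict Int (List Int)),
    (l.foldl (fun d p => d.modify (p.2 - 1) [] (fun t => t ++ [p.1])) d).getD j []
      = d.getD j [] ++ (l.filter (fun p => p.2 - 1 == j)).map (·.1) := by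
  induction l with
  | nil => intro d; simp
  | cons p l ih =>
      intro d
      rw [List.foldl_cons, ih]
      by_cases h : p.2 - 1 = j
      · rw [List.filter_cons_of_pos (by simp [h]), h, PySem.Dict.getD_modify_self]
        simp
      · rw [List.filter_cons_of_neg (by simp [h]),
          PySem.Dict.getD_modify, if_neg (fun hh => h hh.symm)]

theorem occ_getD (os : List Int) (j : Int) :
    (occBuild os).getD j [] = occsOf os j := by
  rw [occBuild, occ_loop_getD, PySem.Dict.getD_empty, List.nil_append, occsOf]

theorem plants_inv (M : Int) (os : List Int) (l : List (Int × Int)) :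
    ∀ (c : Int) (dl : List Int), M ≤ (dl.length : Int) →
      ((l.foldl (bPlantStep M (occBuild os)) (c, dl)).1
          = c + (l.countP (fun p => decide (0 < p.2)) : Int)
        ∧ (l.foldl (bPlantStep M (occBuild os)) (c, dl)).2.length = dl.length
        ∧ ∀ u : Nat,
            (l.foldl (bPlantStep M (occBuild os)) (c, dl)).2.getD u 0
              = dl.getD u 0
                + (l.countP (fun p => decide (0 < p.2)
                    && decide (deathOf os p.1 p.2 = (u : Int))
                    && decide ((u : Int) < M)) : Int)) := by
  induction l with
  | nil => intro c dl hM; simp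
  | cons p l ih =>
      intro c dl hM
      by_cases hp : p.2 ≤ 0
      · have hstep : bPlantStep M (occBuild os) (c, dl) p = (c, dl) := by
          simp [bPlantStep, hp]
        rw [List.foldl_cons, hstep]
        obtain ⟨ih1, ih2, ih3⟩ := ih c dl hM
        refine ⟨?_, ih2, ?_⟩
        · rw [ih1]
          have h0 : (decide (0 < p.2)) = false := by simp; omega
          simp [List.countP_cons, h0]
        · intro u
          rw [ih3 u]
          have h0 : (decide (0 < p.2) && decide (deathOf os p.1 p.2 = (u : Int))
              && decide ((u : Int) < M)) = false := by
            simp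
            intro h
            omega
          simp [List.countP_cons, h0]
      · push_neg at hp
        have he1 : 1 ≤ p.2 := hp
        have hd0 : 0 ≤ deathOf os p.1 p.2 := by
          rw [← deathOf_def]
          exact bDeath_nonneg p.2 he1 _ _ (fun x hx => (occs_mem os p.1 x hx).1) (by omega)
        by_cases hdM : deathOf os p.1 p.2 < M
        · have hdlt : (deathOf os p.1 p.2).toNat < dl.length := by omega
          have hcast : deathOf os p.1 p.2 = (((deathOf os p.1 p.2).toNat : Nat) : Int) := by
            omega
          have hg : PySem.List.pyGetD dl (deathOf os p.1 p.2) 0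
              = dl.getD (deathOf os p.1 p.2).toNat 0 := by
            conv_lhs => rw [hcast]
            rw [PySem.List.pyGetD_natCast]
          have hset : ∀ v : Int, PySem.List.pySetD dl (deathOf os p.1 p.2) v
              = dl.set (deathOf os p.1 p.2).toNat v := by
            intro v
            conv_lhs => rw [hcast]
            rw [PySem.List.pySetD_natCast]
          have hstep : bPlantStep M (occBuild os) (c, dl) p
              = (c + 1, dl.set (deathOf os p.1 p.2).toNat
                  (dl.getD (deathOf os p.1 p.2).toNat 0 + 1)) := by
            simp only [bPlantStep, occ_getD, deathOf_def]
            rw [if_neg (by omega), if_pos hdM, hg, hset]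
          rw [List.foldl_cons, hstep]
          have hlen : (dl.set (deathOf os p.1 p.2).toNat
              (dl.getD (deathOf os p.1 p.2).toNat 0 + 1)).length = dl.length := by
            simp
          obtain ⟨ih1, ih2, ih3⟩ := ih (c + 1)
            (dl.set (deathOf os p.1 p.2).toNat (dl.getD (deathOf os p.1 p.2).toNat 0 + 1))
            (by rw [hlen]; exact hM)
          refine ⟨?_, by rw [ih2, hlen], ?_⟩
          · rw [ih1]
            have h0 : (decide (0 < p.2)) = true := by simp; omega
            simp [List.countP_cons, h0]
            push_cast
            ring
          · intro u
            rw [ih3 u]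
            have hget : (dl.set (deathOf os p.1 p.2).toNat
                (dl.getD (deathOf os p.1 p.2).toNat 0 + 1)).getD u 0
                = dl.getD u 0 + (if u = (deathOf os p.1 p.2).toNat then 1 else 0) := by
              rcases eq_or_ne u (deathOf os p.1 p.2).toNat with rfl | hne
              · rw [List.getD_eq_getElem?_getD, List.getElem?_set,
                  if_pos rfl, if_pos hdlt]
                simp
              · rw [List.getD_eq_getElem?_getD, List.getElem?_set,
                  if_neg (fun h => hne h.symm), ← List.getD_eq_getElem?_getD]
                simp [hne]
            rw [hget]
            have hpred : (decide (0 < p.2) && decide (deathOf os p.1 p.2 = (u : Int))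
                && decide ((u : Int) < M)) = decide (u = (deathOf os p.1 p.2).toNat) := by
              rcases eq_or_ne u (deathOf os p.1 p.2).toNat with rfl | hne
              · have h1 : (((deathOf os p.1 p.2).toNat : Nat) : Int) = deathOf os p.1 p.2 := by
                  omega
                simp [hp, h1, hdM]
              · have h2 : ¬ (deathOf os p.1 p.2 = (u : Int)) := by omega
                simp [h2, hne]
            simp only [List.countP_cons, hpred]
            rcases eq_or_ne u (deathOf os p.1 p.2).toNat with heq | hne
            · simp [heq]
              push_cast
              ring
            · simp [hne]
        · push_neg at hdM
          have hstep : bPlantStep M (occBuild os) (c, dl) p = (c + 1, dl) := by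
            simp only [bPlantStep, occ_getD, deathOf_def]
            rw [if_neg (by omega), if_neg (by omega)]
          rw [List.foldl_cons, hstep]
          obtain ⟨ih1, ih2, ih3⟩ := ih (c + 1) dl hM
          refine ⟨?_, ih2, ?_⟩
          · rw [ih1]
            have h0 : (decide (0 < p.2)) = true := by simp; omega
            simp [List.countP_cons, h0]
            push_cast
            ring
          · intro u
            rw [ih3 u]
            have h0 : (decide (0 < p.2) && decide (deathOf os p.1 p.2 = (u : Int))
                && decide ((u : Int) < M)) = false := by
              simp
              intro _ h
              omega
            simp [List.countP_cons, h0]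

-- partial sums of the difference array
def sTo (dl : List Int) (k : Nat) : Int := ((List.range k).map (fun u => dl.getD u 0)).sum

theorem sTo_succ (dl : List Int) (k : Nat) :
    sTo dl (k + 1) = sTo dl k + dl.getD k 0 := by
  simp [sTo, List.range_succ]

theorem final_loop (deaths : List Int) (P : Int) (M : Nat) :
    ∀ (n a : Nat) (res0 : List Int), a + n = M →
      ((PySem.List.pyRange (a : Int) (M : Int) 1).foldl (bCountStep deaths)
          (P - sTo deaths a, res0))
        = (P - sTo deaths M,
           res0 ++ (List.range n).map (fun k => P - sTo deaths (a + k + 1))) := by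
  intro n
  induction n with
  | zero =>
      intro a res0 ha
      have : a = M := by omega
      subst this
      rw [PySem.List.pyRange_one_eq_nil (le_refl _)]
      simp
  | succ n ihn =>
      intro a res0 ha
      rw [PySem.List.pyRange_one_cons (by push_cast; omega), List.foldl_cons]
      have hstep : bCountStep deaths (P - sTo deaths a, res0) (a : Int)
          = (P - sTo deaths (a + 1), res0 ++ [P - sTo deaths (a + 1)]) := by
        simp only [bCountStep, PySem.List.pyGetD_natCast, sTo_succ]
        rw [show P - sTo deaths a - deaths.getD a 0
            = P - (sTo deaths a + deaths.getD a 0) from by ring]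
      rw [hstep, show ((a : Int) + 1) = (((a + 1 : Nat) : Nat) : Int) from by push_cast; ring,
        ihn (a + 1) _ (by omega)]
      rw [List.append_assoc, Prod.mk.injEq]
      refine ⟨rfl, ?_⟩
      rw [List.append_right_inj]
      rw [List.range_succ_eq_map, List.map_cons, List.map_map, List.singleton_append]
      refine congrArg₂ List.cons ?_ ?_
      · norm_num
      apply List.map_congr_left
      intro k _
      show P - sTo deaths (a + 1 + k + 1) = P - sTo deaths (a + (k + 1) + 1)
      rw [show a + 1 + k + 1 = a + (k + 1) + 1 from by omega]

theorem countP_split_int (l : List (Int × Int)) (f : Int × Int → Bool)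
    (D : Int × Int → Int) (k : Int) :
    (l.countP (fun p => f p && decide (D p ≤ k)) : Int)
      = (l.countP (fun p => f p && decide (D p < k)) : Int)
        + (l.countP (fun p => f p && decide (D p = k)) : Int) := by
  induction l with
  | nil => simp
  | cons a l ih =>
      rw [List.countP_cons, List.countP_cons, List.countP_cons]
      push_cast
      by_cases hf : f a = true
      · by_cases h1 : D a < k
        · have e1 : (f a && decide (D a ≤ k)) = true := by simp [hf]; omega
          have e2 : (f a && decide (D a < k)) = true := by simp [hf, h1]
          have e3 : (f a && decide (D a = k)) = false := by simp [hf]; omega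
          simp only [e1, e2, e3]
          norm_num
          omega
        · by_cases h2 : D a = k
          · have e1 : (f a && decide (D a ≤ k)) = true := by simp [hf]; omega
            have e2 : (f a && decide (D a < k)) = false := by simp [hf]; omega
            have e3 : (f a && decide (D a = k)) = true := by simp [hf, h2]
            simp only [e1, e2, e3]
            norm_num <;> omega
          · have e1 : (f a && decide (D a ≤ k)) = false := by simp [hf]; omega
            have e2 : (f a && decide (D a < k)) = false := by simp [hf]; omega
            have e3 : (f a && decide (D a = k)) = false := by simp [hf]; omega
            simp only [e1, e2, e3]
            norm_num <;> omega
      · have hf' : f a = false := by revert hf; cases f a <;> simp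
        have e1 : (f a && decide (D a ≤ k)) = false := by simp [hf']
        have e2 : (f a && decide (D a < k)) = false := by simp [hf']
        have e3 : (f a && decide (D a = k)) = false := by simp [hf']
        simp only [e1, e2, e3]
        norm_num <;> omega

theorem countP_total (l : List (Int × Int)) (f : Int × Int → Bool)
    (D : Int × Int → Int) (t : Int) :
    (l.countP f : Int)
      = (l.countP (fun p => f p && decide (D p ≤ t)) : Int)
        + (l.countP (fun p => f p && decide (t < D p)) : Int) := by
  induction l with
  | nil => simp
  | cons a l ih =>
      rw [List.countP_cons, List.countP_cons, List.countP_cons]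
      push_cast
      by_cases hf : f a = true
      · by_cases h1 : D a ≤ t
        · have e1 : (f a && decide (D a ≤ t)) = true := by simp [hf, h1]
          have e2 : (f a && decide (t < D a)) = false := by simp [hf]; omega
          simp only [e1, e2, hf]
          norm_num <;> omega
        · have e1 : (f a && decide (D a ≤ t)) = false := by simp [hf]; omega
          have e2 : (f a && decide (t < D a)) = true := by simp [hf]; omega
          simp only [e1, e2, hf]
          norm_num <;> omega
      · have hf' : f a = false := by revert hf; cases f a <;> simp
        have e1 : (f a && decide (D a ≤ t)) = false := by simp [hf']
        have e2 : (f a && decide (t < D a)) = false := by simp [hf']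
        simp only [e1, e2, hf']
        norm_num <;> omega

theorem solve_alt_eq_spec (em os : List Int) :
    solve_alt em os = (List.range os.length).map (fun t : Nat => specCnt em os (t : Int)) := by
  obtain ⟨h1, h2, h3⟩ := plants_inv ((os.length : Int)) os (PySem.List.enumerate em 0)
    0 (List.replicate (os.length + 1) 0) (by simp)
  set pd := (PySem.List.enumerate em 0).foldl
      (bPlantStep ((os.length : Int)) (occBuild os))
      ((0 : Int), List.replicate (os.length + 1) (0 : Int)) with hpd
  have hrep : ∀ u : Nat, (List.replicate (os.length + 1) (0 : Int)).getD u 0 = 0 := by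
    intro u
    rcases lt_or_ge u (os.length + 1) with h | h
    · rw [List.getD_eq_getElem?_getD, List.getElem?_replicate, if_pos h]
      rfl
    · rw [List.getD_eq_getElem?_getD, List.getElem?_replicate, if_neg (by omega)]
      rfl
  have hP : pd.1 = ((PySem.List.enumerate em 0).countP (fun p => decide (0 < p.2)) : Int) := by
    rw [h1]
    ring
  have hdl : ∀ u : Nat, pd.2.getD u 0
      = ((PySem.List.enumerate em 0).countP (fun p => decide (0 < p.2)
          && decide (deathOf os p.1 p.2 = (u : Int))
          && decide ((u : Int) < (os.length : Int))) : Int) := by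
    intro u
    rw [h3 u, hrep u]
    ring
  have hsum : ∀ k : Nat, k ≤ os.length →
      sTo pd.2 k = ((PySem.List.enumerate em 0).countP (fun p => decide (0 < p.2)
        && decide (deathOf os p.1 p.2 ≤ (k : Int) - 1)) : Int) := by
    intro k
    induction k with
    | zero =>
        intro _
        have hz : ((PySem.List.enumerate em 0).countP (fun p => decide (0 < p.2)
            && decide (deathOf os p.1 p.2 ≤ (-1 : Int)))) = 0 := by
          rw [List.countP_eq_zero]
          intro p _
          simp
          intro hpos
          have hd0 : 0 ≤ deathOf os p.1 p.2 := by
            rw [← deathOf_def]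
            exact bDeath_nonneg p.2 (by omega) _ _
              (fun x hx => (occs_mem os p.1 x hx).1) (by omega)
          omega
        simp [sTo, hz]
    | succ k ihk =>
        intro hk
        rw [sTo_succ, ihk (by omega), hdl k]
        have hcv1 : ((PySem.List.enumerate em 0).countP (fun p => decide (0 < p.2)
              && decide (deathOf os p.1 p.2 ≤ (k : Int) - 1)))
            = ((PySem.List.enumerate em 0).countP (fun p => decide (0 < p.2)
              && decide (deathOf os p.1 p.2 < (k : Int)))) := by
          apply List.countP_congr
          intro p _
          have hiff : (deathOf os p.1 p.2 ≤ (k : Int) - 1)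
              ↔ (deathOf os p.1 p.2 < (k : Int)) := by omega
          rw [decide_eq_decide.mpr hiff]
        have hcv2 : ((PySem.List.enumerate em 0).countP (fun p => decide (0 < p.2)
              && decide (deathOf os p.1 p.2 = ((k : Nat) : Int))
              && decide (((k : Nat) : Int) < (os.length : Int))))
            = ((PySem.List.enumerate em 0).countP (fun p => decide (0 < p.2)
              && decide (deathOf os p.1 p.2 = (k : Int)))) := by
          apply List.countP_congr
          intro p _
          have hklt : ((k : Nat) : Int) < (os.length : Int) := by omega
          simp [hklt]
        have hcv3 : ((k + 1 : Nat) : Int) - 1 = (k : Int) := by push_cast; ring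
        rw [hcv1, hcv2, hcv3,
          countP_split_int (PySem.List.enumerate em 0)
            (fun p => decide (0 < p.2)) (fun p => deathOf os p.1 p.2) (k : Int)]
  show ((PySem.List.pyRange 0 ((os.length : Nat) : Int) 1).foldl (bCountStep pd.2)
      (pd.1, ([] : List Int))).2 = _
  have hstart : ((pd.1 : Int), ([] : List Int)) = (pd.1 - sTo pd.2 0, ([] : List Int)) := by
    simp [sTo]
  rw [hstart, show ((0 : Int)) = ((0 : Nat) : Int) from by simp,
    final_loop pd.2 pd.1 os.length os.length 0 [] (by omega)]
  simp only [List.nil_append]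
  apply List.map_congr_left
  intro t ht
  rw [List.mem_range] at ht
  have hcast : ((0 + t + 1 : Nat) : Int) - 1 = (t : Int) := by push_cast; ring
  rw [show (0 + t + 1) = t + 1 from by omega, hP, hsum (t + 1) (by omega)]
  have hcv : ((PySem.List.enumerate em 0).countP (fun p => decide (0 < p.2)
        && decide (deathOf os p.1 p.2 ≤ ((t + 1 : Nat) : Int) - 1)))
      = ((PySem.List.enumerate em 0).countP (fun p => decide (0 < p.2)
        && decide (deathOf os p.1 p.2 ≤ (t : Int)))) := by
    apply List.countP_congr
    intro p _
    have hiff : (deathOf os p.1 p.2 ≤ ((t + 1 : Nat) : Int) - 1)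
        ↔ (deathOf os p.1 p.2 ≤ (t : Int)) := by omega
    rw [decide_eq_decide.mpr hiff]
  rw [hcv, specCnt]
  have := countP_total (PySem.List.enumerate em 0) (fun p => decide (0 < p.2))
    (fun p => deathOf os p.1 p.2) (t : Int)
  omega

-- ===== VERDICT (by name: the statement is the Claim_ definition above) =====
theorem solve_spec : Claim_equal_solve := by
  intro em os _
  unfold Spec_solve
  rw [solve_eq_spec, solve_alt_eq_spec]
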